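-- pv_equiv track=rewrite | github.com/stenknutsen/HomeGrownPOSTagger | PhaseThreeTagging.py | MD_as_VerbTagger
-- ===== SOURCE A (Python) =====
-- def MD_as_VerbTagger(sent):
--     sentToReturn = []
--     skip = False
--     for i in range(len(sent)-2):
--
--         if skip == True:
--             skip = False
--             continue
--
--         leftContext = sent[i]
--         target = sent[i+1]
--         rightContext = sent[i+2]
--
--         if (leftContext[1]=="MD")&(target[1]=="UNK")&(rightContext[0].lower() == "as")&(target[0].lower()!="just"):
--
--             sentToReturn += [leftContext]
--             newTup = (target[0], "V")
--             sentToReturn += [newTup]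
--
--             skip = True
--         else:
--
--           sentToReturn += [leftContext]
--
--     sentToReturn += [sent[len(sent)-2]]
--     sentToReturn += [sent[len(sent)-1]]
--
--     return sentToReturn
-- ===== SOURCE B (Python) =====
-- def MD_as_VerbTagger(sent):
--     n = len(sent)
--     # Pass 1: collect match positions. Matches are never adjacent (a match at i
--     # forces sent[i+1][1] == "UNK", which then cannot be "MD"), so no skip flag
--     # is needed during detection.
--     matches = {i for i in range(n - 2)
--                if sent[i][1] == "MD" and sent[i + 1][1] == "UNK"
--                and sent[i + 2][0].lower() == "as"
--                and sent[i + 1][0].lower() != "just"}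
--     consumed = {i + 1 for i in matches}
--     # Pass 2: emit from the precomputed sets, then append the last two tokens.
--     out = []
--     for i in range(n - 2):
--         if i in consumed:
--             continue
--         out.append(sent[i])
--         if i in matches:
--             out.append((sent[i + 1][0], "V"))
--     out.append(sent[n - 2])
--     out.append(sent[n - 1])
--     return out
-- ===== Notes on version B (the rewrite author's own statement) =====
-- stated objective: alternative
-- what changed: Replaces A's single stateful scan with a skip flag by a two-pass design: first compute the set of match positions (provably non-overlapping) and the derived consumed positions, then emit from those sets; the tail append is kept.
import Mathlib
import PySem

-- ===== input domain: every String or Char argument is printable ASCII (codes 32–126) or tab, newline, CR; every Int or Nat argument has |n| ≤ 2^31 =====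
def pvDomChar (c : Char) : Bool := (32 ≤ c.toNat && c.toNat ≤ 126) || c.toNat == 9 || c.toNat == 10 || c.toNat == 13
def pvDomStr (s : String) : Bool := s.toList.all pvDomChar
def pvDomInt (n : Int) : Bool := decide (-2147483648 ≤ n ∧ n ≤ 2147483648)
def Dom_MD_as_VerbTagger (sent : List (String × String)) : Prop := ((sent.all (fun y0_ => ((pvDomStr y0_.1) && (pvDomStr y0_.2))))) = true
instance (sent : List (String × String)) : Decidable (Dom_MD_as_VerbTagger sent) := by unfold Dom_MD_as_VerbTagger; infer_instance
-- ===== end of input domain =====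

-- B replaces A's stateful skip-flag scan by two passes over precomputed match/consumed sets (objective: alternative; same cost).
-- Indexing helper: sent[i]; every use below is in range on Pre_, so the default is never returned.
def pvGet (sent : List (String × String)) (i : Int) : String × String :=
  PySem.List.pyGetD sent i ("", "")

-- The shared match condition at position i (A's if-condition; Python's '&' on bools is Bool.and).
def pvCond (sent : List (String × String)) (i : Int) : Bool :=
  ((pvGet sent i).2 == "MD") && ((pvGet sent (i + 1)).2 == "UNK")
    && (PySem.Str.lower (pvGet sent (i + 2)).1 == "as")
    && !(PySem.Str.lower (pvGet sent (i + 1)).1 == "just")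

-- ===== PORT A =====
-- A's loop body: state = (sentToReturn, skip).
def pvStepA (sent : List (String × String)) (st : List (String × String) × Bool) (i : Int) :
    List (String × String) × Bool :=
  if st.2 then (st.1, false)
  else
    let leftContext := pvGet sent i
    let target := pvGet sent (i + 1)
    if pvCond sent i then (st.1 ++ [leftContext] ++ [(target.1, "V")], true)
    else (st.1 ++ [leftContext], false)

def MD_as_VerbTagger (sent : List (String × String)) : List (String × String) :=
  let n : Int := sent.length
  (((PySem.List.pyRange 0 (n - 2)).foldl (pvStepA sent) ([], false)).1)
    ++ [pvGet sent (n - 2)] ++ [pvGet sent (n - 1)]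

-- ===== PORT B =====
-- B's second-pass body, reading the precomputed sets.
def pvStepB (sent : List (String × String)) (mset cset : PySem.Set Int)
    (acc : List (String × String)) (i : Int) : List (String × String) :=
  if PySem.Set.contains cset i then acc
  else
    let acc2 := acc ++ [pvGet sent i]
    if PySem.Set.contains mset i then acc2 ++ [((pvGet sent (i + 1)).1, "V")] else acc2

def MD_as_VerbTagger_alt (sent : List (String × String)) : List (String × String) :=
  let n : Int := sent.length
  let mset : PySem.Set Int :=
    PySem.Set.ofList ((PySem.List.pyRange 0 (n - 2)).filter (pvCond sent))
  let cset : PySem.Set Int := PySem.Set.ofList (mset.map (· + 1))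
  ((PySem.List.pyRange 0 (n - 2)).foldl (pvStepB sent mset cset) [])
    ++ [pvGet sent (n - 2), pvGet sent (n - 1)]

-- ===== PRECONDITION & SPEC =====
-- Pre_ excludes exactly the empty list, on which A raises IndexError (sent[-2]).
def Pre_MD_as_VerbTagger (sent : List (String × String)) : Prop := sent ≠ []
instance (sent : List (String × String)) : Decidable (Pre_MD_as_VerbTagger sent) := by
  unfold Pre_MD_as_VerbTagger; infer_instance

def pvWitness_MD_as_VerbTagger : (List (String × String)) := [("a", "MD"), ("b", "UNK"), ("as", "X")]

def Spec_MD_as_VerbTagger (sent : List (String × String)) (out : List (String × String)) : Prop := out = MD_as_VerbTagger_alt sent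
instance (sent : List (String × String)) (out : List (String × String)) : Decidable (Spec_MD_as_VerbTagger sent out) := by unfold Spec_MD_as_VerbTagger; infer_instance

-- ===== CLAIM (what is proved, stated in full; the proofs are below) =====
def Claim_equal_MD_as_VerbTagger : Prop := ∀ (sent : List (String × String)), Dom_MD_as_VerbTagger sent → Pre_MD_as_VerbTagger sent → Spec_MD_as_VerbTagger sent (MD_as_VerbTagger sent)

-- ===== LEMMAS AND PROOFS =====

-- The (nodup) list of match positions, as built by B's first pass.
def pvM (sent : List (String × String)) : List Int :=
  (PySem.List.pyRange 0 ((sent.length : Int) - 2)).filter (pvCond sent)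

theorem mem_pvM (sent : List (String × String)) (i : Int) :
    i ∈ pvM sent ↔ 0 ≤ i ∧ i < (sent.length : Int) - 2 ∧ pvCond sent i = true := by
  simp [pvM, List.mem_filter, PySem.List.mem_pyRange_one, and_assoc]

theorem containsM_iff (sent : List (String × String)) (i : Int) :
    PySem.Set.contains (PySem.Set.ofList (pvM sent)) i = true ↔
      0 ≤ i ∧ i < (sent.length : Int) - 2 ∧ pvCond sent i = true := by
  rw [PySem.Set.contains, List.contains_iff_mem, PySem.Set.mem_ofList, mem_pvM]

theorem containsC_iff (sent : List (String × String)) (i : Int) :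
    PySem.Set.contains (PySem.Set.ofList ((PySem.Set.ofList (pvM sent)).map (· + 1))) i = true ↔
      1 ≤ i ∧ i < (sent.length : Int) - 1 ∧ pvCond sent (i - 1) = true := by
  rw [PySem.Set.contains, List.contains_iff_mem, PySem.Set.mem_ofList]
  simp only [List.mem_map, PySem.Set.mem_ofList]
  constructor
  · rintro ⟨a, ha, rfl⟩
    rw [mem_pvM] at ha
    refine ⟨by omega, by omega, ?_⟩
    simpa using ha.2.2
  · rintro ⟨h1, h2, hc⟩
    exact ⟨i - 1, (mem_pvM sent _).2 ⟨by omega, by omega, hc⟩, by omega⟩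

-- Matches are never adjacent: a match at i forces sent[i+1][1] = "UNK" ≠ "MD".
theorem pvCond_succ_false (sent : List (String × String)) (i : Int)
    (h : pvCond sent i = true) : pvCond sent (i + 1) = false := by
  simp only [pvCond, Bool.and_eq_true, beq_iff_eq] at h
  have hu : (pvGet sent (i + 1)).2 = "UNK" := h.1.1.2
  simp [pvCond, hu]

-- Loop invariant: A's fold from index j with skip = (1 ≤ j && cond (j-1)) produces B's fold from j.
theorem loop_eq (sent : List (String × String)) :
    ∀ (k : Nat) (j : Int), 0 ≤ j → j + k = (sent.length : Int) - 2 →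
      ∀ acc : List (String × String),
        ((PySem.List.pyRange j ((sent.length : Int) - 2)).foldl (pvStepA sent)
            (acc, decide (1 ≤ j) && pvCond sent (j - 1))).1
          = (PySem.List.pyRange j ((sent.length : Int) - 2)).foldl
              (pvStepB sent (PySem.Set.ofList (pvM sent))
                (PySem.Set.ofList ((PySem.Set.ofList (pvM sent)).map (· + 1)))) acc := by
  intro k
  induction k with
  | zero =>
    intro j hj hjk acc
    rw [PySem.List.pyRange_one_eq_nil (by omega)]
    simp
  | succ k ih =>
    intro j hj hjk acc
    rw [PySem.List.pyRange_one_cons (by omega)]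
    simp only [List.foldl_cons]
    by_cases hskip : (decide (1 ≤ j) && pvCond sent (j - 1)) = true
    · -- A skips j; B sees j ∈ consumed.
      rw [Bool.and_eq_true, decide_eq_true_eq] at hskip
      obtain ⟨hj1, hc0⟩ := hskip
      have hcj : pvCond sent j = false := by
        have := pvCond_succ_false sent (j - 1) hc0
        simpa [sub_add_cancel] using this
      have hcons : PySem.Set.contains (PySem.Set.ofList ((PySem.Set.ofList (pvM sent)).map (· + 1))) j = true :=
        (containsC_iff sent j).2 ⟨hj1, by omega, hc0⟩
      have hA : pvStepA sent (acc, decide (1 ≤ j) && pvCond sent (j - 1)) j = (acc, false) := by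
        simp [pvStepA, hj1, hc0]
      have hB : pvStepB sent (PySem.Set.ofList (pvM sent))
          (PySem.Set.ofList ((PySem.Set.ofList (pvM sent)).map (· + 1))) acc j = acc := by
        simp only [pvStepB, hcons]; simp
      rw [hA, hB]
      have := ih (j + 1) (by omega) (by omega) acc
      have hs' : (decide (1 ≤ j + 1) && pvCond sent (j + 1 - 1)) = false := by
        simp only [add_sub_cancel_right]
        simp [hcj]
      rw [hs'] at this
      exact this
    · -- A does not skip j.
      have hskipf : (decide (1 ≤ j) && pvCond sent (j - 1)) = false := by
        simpa using hskip
      have hcons : PySem.Set.contains (PySem.Set.ofList ((PySem.Set.ofList (pvM sent)).map (· + 1))) j = false := by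
        rw [← Bool.not_eq_true, containsC_iff]
        rw [Bool.and_eq_false_iff] at hskipf
        rcases hskipf with h | h
        · have : ¬ 1 ≤ j := by simpa using h
          intro hh; exact this hh.1
        · intro hh
          have : pvCond sent (j - 1) = true := hh.2.2
          rw [h] at this; exact Bool.false_ne_true this
      by_cases hcj : pvCond sent j = true
      · have hm : PySem.Set.contains (PySem.Set.ofList (pvM sent)) j = true :=
          (containsM_iff sent j).2 ⟨hj, by omega, hcj⟩
        have hA : pvStepA sent (acc, decide (1 ≤ j) && pvCond sent (j - 1)) j
            = (acc ++ [pvGet sent j] ++ [((pvGet sent (j + 1)).1, "V")], true) := by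
          simp [pvStepA, hskipf, hcj]
        have hB : pvStepB sent (PySem.Set.ofList (pvM sent))
            (PySem.Set.ofList ((PySem.Set.ofList (pvM sent)).map (· + 1))) acc j
            = acc ++ [pvGet sent j] ++ [((pvGet sent (j + 1)).1, "V")] := by
          simp only [pvStepB, hcons, hm]; simp
        rw [hA, hB]
        have := ih (j + 1) (by omega) (by omega) (acc ++ [pvGet sent j] ++ [((pvGet sent (j + 1)).1, "V")])
        have hs' : (decide (1 ≤ j + 1) && pvCond sent (j + 1 - 1)) = true := by
          simp only [add_sub_cancel_right]
          have h1j : (1 : Int) ≤ j + 1 := by omega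
          simp [hcj, h1j]
        rw [hs'] at this
        exact this
      · have hcjf : pvCond sent j = false := by simpa using hcj
        have hm : PySem.Set.contains (PySem.Set.ofList (pvM sent)) j = false := by
          rw [← Bool.not_eq_true, containsM_iff]
          intro hh; rw [hcjf] at hh; exact Bool.false_ne_true hh.2.2
        have hA : pvStepA sent (acc, decide (1 ≤ j) && pvCond sent (j - 1)) j
            = (acc ++ [pvGet sent j], false) := by
          simp [pvStepA, hskipf, hcjf]
        have hB : pvStepB sent (PySem.Set.ofList (pvM sent))
            (PySem.Set.ofList ((PySem.Set.ofList (pvM sent)).map (· + 1))) acc j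
            = acc ++ [pvGet sent j] := by
          simp only [pvStepB, hcons, hm]; simp
        rw [hA, hB]
        have := ih (j + 1) (by omega) (by omega) (acc ++ [pvGet sent j])
        have hs' : (decide (1 ≤ j + 1) && pvCond sent (j + 1 - 1)) = false := by
          simp only [add_sub_cancel_right]
          simp [hcjf]
        rw [hs'] at this
        exact this

-- ===== VERDICT (by name: the statement is the Claim_ definition above) =====
theorem MD_as_VerbTagger_spec : Claim_equal_MD_as_VerbTagger := by
  intro sent _hdom _hpre
  unfold Spec_MD_as_VerbTagger MD_as_VerbTagger MD_as_VerbTagger_alt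
  simp only []
  by_cases hm : (sent.length : Int) - 2 ≤ 0
  · rw [PySem.List.pyRange_one_eq_nil hm]
    simp
  · have h0 : (0 : Int) + (((sent.length : Int) - 2).toNat : Int) = (sent.length : Int) - 2 := by omega
    have := loop_eq sent ((sent.length : Int) - 2).toNat 0 le_rfl h0 []
    rw [show (decide (1 ≤ (0 : Int)) && pvCond sent (0 - 1)) = false by simp] at this
    simp only [pvM] at this
    rw [this]
    simp [List.append_assoc]
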